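-- pv_equiv track=rewrite | github.com/Shikher-jain/Data-Vista | fastapi_app.py | generate_learning_plan
-- ===== SOURCE A (Python) =====
-- from typing import List, Optional
--
-- def generate_learning_plan(role_title: str, missing_skills: List[str]):
--     plan = {"30 Days": [], "60 Days": [], "90 Days": []}
--     if not missing_skills:
--         plan["30 Days"].append("Revise existing skills and practice small projects.")
--         plan["60 Days"].append("Work on intermediate-level projects in your role domain.")
--         plan["90 Days"].append("Prepare for interviews and apply for jobs.")
--     else:
--         for i, skill in enumerate(missing_skills):
--             if i % 3 == 0:
--                 plan["30 Days"].append(f"Learn basics of {skill} (online tutorials).")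
--             elif i % 3 == 1:
--                 plan["60 Days"].append(f"Do a mini-project using {skill}.")
--             else:
--                 plan["90 Days"].append(f"Master {skill} and apply it in a portfolio project.")
--     return plan
-- ===== SOURCE B (Python) =====
-- def generate_learning_plan(role_title, missing_skills):
--     if not missing_skills:
--         return {
--             "30 Days": ["Revise existing skills and practice small projects."],
--             "60 Days": ["Work on intermediate-level projects in your role domain."],
--             "90 Days": ["Prepare for interviews and apply for jobs."],
--         }
--     return {
--         "30 Days": [f"Learn basics of {skill} (online tutorials)." for skill in missing_skills[0::3]],
--         "60 Days": [f"Do a mini-project using {skill}." for skill in missing_skills[1::3]],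
--         "90 Days": [f"Master {skill} and apply it in a portfolio project." for skill in missing_skills[2::3]],
--     }
-- ===== Notes on version B (the rewrite author's own statement) =====
-- stated objective: idiomatic
-- what changed: A fills the three buckets in one pass over enumerate(missing_skills) branching on i % 3; B has no index test at all: it returns dict literals directly, building each bucket from a strided slice missing_skills[0::3] / [1::3] / [2::3].
import Mathlib
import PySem

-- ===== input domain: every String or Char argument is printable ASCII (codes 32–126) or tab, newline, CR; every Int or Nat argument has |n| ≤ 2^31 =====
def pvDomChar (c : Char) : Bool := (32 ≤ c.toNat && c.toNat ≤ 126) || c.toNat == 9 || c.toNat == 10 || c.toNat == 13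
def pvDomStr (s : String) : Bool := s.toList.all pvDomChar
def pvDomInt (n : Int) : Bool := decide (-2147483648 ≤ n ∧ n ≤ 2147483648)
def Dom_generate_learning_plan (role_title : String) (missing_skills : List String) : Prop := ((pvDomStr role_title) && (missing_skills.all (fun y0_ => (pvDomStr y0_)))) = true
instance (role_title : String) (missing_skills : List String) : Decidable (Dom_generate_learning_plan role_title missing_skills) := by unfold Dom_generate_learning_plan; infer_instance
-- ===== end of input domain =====

-- B replaces A's single i%3-branching pass with dict literals built from three strided slices (same output; idiomatic, not faster).
-- ===== PORT A =====
def generate_learning_plan (role_title : String) (missing_skills : List String) : List (String × List String) :=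
  let plan : PySem.Dict String (List String) :=
    PySem.Dict.mk [("30 Days", []), ("60 Days", []), ("90 Days", [])]
  if missing_skills = [] then
    (((plan.modify "30 Days" [] (· ++ ["Revise existing skills and practice small projects."])).modify
        "60 Days" [] (· ++ ["Work on intermediate-level projects in your role domain."])).modify
        "90 Days" [] (· ++ ["Prepare for interviews and apply for jobs."])).items
  else
    ((PySem.List.enumerate missing_skills 0).foldl (fun plan p =>
        if PySem.Int.mod p.1 3 == 0 then
          plan.modify "30 Days" [] (· ++ ["Learn basics of " ++ p.2 ++ " (online tutorials)."])
        else if PySem.Int.mod p.1 3 == 1 then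
          plan.modify "60 Days" [] (· ++ ["Do a mini-project using " ++ p.2 ++ "."])
        else
          plan.modify "90 Days" [] (· ++ ["Master " ++ p.2 ++ " and apply it in a portfolio project."]))
      plan).items

-- ===== PORT B =====
def generate_learning_plan_alt (role_title : String) (missing_skills : List String) : List (String × List String) :=
  if missing_skills = [] then
    [("30 Days", ["Revise existing skills and practice small projects."]),
     ("60 Days", ["Work on intermediate-level projects in your role domain."]),
     ("90 Days", ["Prepare for interviews and apply for jobs."])]
  else
    [("30 Days", ((PySem.List.slice? missing_skills (some 0) none 3).getD []).map
        (fun skill => "Learn basics of " ++ skill ++ " (online tutorials).")),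
     ("60 Days", ((PySem.List.slice? missing_skills (some 1) none 3).getD []).map
        (fun skill => "Do a mini-project using " ++ skill ++ ".")),
     ("90 Days", ((PySem.List.slice? missing_skills (some 2) none 3).getD []).map
        (fun skill => "Master " ++ skill ++ " and apply it in a portfolio project."))]

-- ===== PRECONDITION & SPEC =====
def Spec_generate_learning_plan (role_title : String) (missing_skills : List String) (out : List (String × List String)) : Prop := out = generate_learning_plan_alt role_title missing_skills
instance (role_title : String) (missing_skills : List String) (out : List (String × List String)) : Decidable (Spec_generate_learning_plan role_title missing_skills out) := by unfold Spec_generate_learning_plan; infer_instance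

-- ===== CLAIM (what is proved, stated in full; the proofs are below) =====
def Claim_equal_generate_learning_plan : Prop := ∀ (role_title : String) (missing_skills : List String), Dom_generate_learning_plan role_title missing_skills → Spec_generate_learning_plan role_title missing_skills (generate_learning_plan role_title missing_skills)

-- ===== LEMMAS AND PROOFS =====

-- every third element of a list, starting at its head (proof-side view of xs[k::3])
def pvStride3 {α : Type} : List α → List α
  | [] => []
  | a :: rest => a :: pvStride3 (rest.drop 2)
  termination_by xs => xs.length
  decreasing_by simp

theorem pvStride3_range {α : Type} (ys : List α) :
    (List.range ((ys.length + 2) / 3)).filterMap (fun j => ys[3 * j]?) = pvStride3 ys := by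
  induction h : ys.length using Nat.strong_induction_on generalizing ys with
  | _ n ih =>
    cases ys with
    | nil => rw [pvStride3]; simp
    | cons a rest =>
      subst h
      rw [pvStride3]
      have hcount : ((a :: rest).length + 2) / 3 = rest.length / 3 + 1 := by simp; omega
      rw [hcount, List.range_succ_eq_map, List.filterMap_cons, List.filterMap_map]
      simp only [Nat.mul_zero, List.getElem?_cons_zero]
      have hfun : ((fun j => (a :: rest)[3 * j]?) ∘ Nat.succ) = (fun j => (rest.drop 2)[3 * j]?) := by
        funext j
        simp only [Function.comp]
        rw [List.getElem?_drop]
        have h3 : 3 * (j + 1) = (2 + 3 * j) + 1 := by omega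
        rw [Nat.succ_eq_add_one, h3, List.getElem?_cons_succ]
      rw [hfun]
      have hn2 : ((rest.drop 2).length + 2) / 3 = rest.length / 3 := by simp; omega
      rw [← hn2, ih (rest.drop 2).length (by simp only [List.length_drop, List.length_cons]; omega) _ rfl]

theorem pvSlice3 {α : Type} (xs : List α) (k : Nat) :
    (PySem.List.slice? xs (some (k : Int)) none 3).getD [] = pvStride3 (xs.drop k) := by
  simp only [PySem.List.slice?, PySem.List.sliceIndices]
  norm_num
  have hk0 : ¬((k:Int) < 0) := by omega
  simp only [if_neg hk0]
  by_cases hk : k < xs.length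
  · have h1 : min (k:Int) (xs.length:Int) = (k:Int) := by omega
    rw [h1, if_pos (show (k:Int) < (xs.length:Int) by exact_mod_cast hk)]
    have h3 : ((((xs.length:Int)) - k + 3 - 1)/3).toNat = ((xs.drop k).length + 2)/3 := by
      simp only [List.length_drop]; omega
    rw [h3]
    have h4 : (fun x : Nat => xs[((k:Int) + 3 * (x:Int)).toNat]?) = (fun x : Nat => (xs.drop k)[3*x]?) := by
      funext x
      rw [List.getElem?_drop, show ((k:Int) + 3 * (x:Int)).toNat = k + 3*x from by omega]
    rw [h4]
    exact pvStride3_range _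
  · have h1 : min (k:Int) (xs.length:Int) = ((xs.length:Int)) := by omega
    rw [h1, if_neg (by omega), List.drop_eq_nil_of_le (by omega)]
    rw [pvStride3]
    simp

theorem pvLoopA (xs : List String) (m : Nat) (a b c : List String) :
    ((PySem.List.enumerate xs (3 * (m : Int))).foldl (fun plan p =>
        if PySem.Int.mod p.1 3 == 0 then
          plan.modify "30 Days" [] (· ++ ["Learn basics of " ++ p.2 ++ " (online tutorials)."])
        else if PySem.Int.mod p.1 3 == 1 then
          plan.modify "60 Days" [] (· ++ ["Do a mini-project using " ++ p.2 ++ "."])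
        else
          plan.modify "90 Days" [] (· ++ ["Master " ++ p.2 ++ " and apply it in a portfolio project."]))
      (PySem.Dict.mk [("30 Days", a), ("60 Days", b), ("90 Days", c)])).items
    = [("30 Days", a ++ (pvStride3 xs).map (fun s => "Learn basics of " ++ s ++ " (online tutorials).")),
       ("60 Days", b ++ (pvStride3 (xs.drop 1)).map (fun s => "Do a mini-project using " ++ s ++ ".")),
       ("90 Days", c ++ (pvStride3 (xs.drop 2)).map (fun s => "Master " ++ s ++ " and apply it in a portfolio project."))] := by
  induction h : xs.length using Nat.strong_induction_on generalizing xs m a b c with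
  | _ n ih =>
    have hm0 : PySem.Int.mod (3 * (m : Int)) 3 = 0 := by
      rw [PySem.Int.mod_eq_emod_of_pos (by norm_num)]; omega
    have hm1 : PySem.Int.mod (3 * (m : Int) + 1) 3 = 1 := by
      rw [PySem.Int.mod_eq_emod_of_pos (by norm_num)]; omega
    have hm2 : PySem.Int.mod (3 * (m : Int) + 1 + 1) 3 = 2 := by
      rw [PySem.Int.mod_eq_emod_of_pos (by norm_num)]; omega
    have hnilS : pvStride3 ([] : List String) = [] := by rw [pvStride3]
    have hone : ∀ (u : String), pvStride3 [u] = [u] := by intro u; rw [pvStride3]; simp [hnilS]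
    have htwo : ∀ (u v : String), pvStride3 [u, v] = [u] := by
      intro u v; rw [pvStride3]; simp [hnilS]
    match xs with
    | [] =>
      simp [PySem.List.enumerate_nil, hnilS]
    | [x] =>
      simp [PySem.List.enumerate_cons, PySem.List.enumerate_nil, hnilS, hone,
        PySem.Dict.modify, PySem.Dict.insert, PySem.Dict.getD, PySem.Dict.get?]
    | [x, y] =>
      simp [PySem.List.enumerate_cons, PySem.List.enumerate_nil, hnilS, hone, htwo,
        PySem.Dict.modify, PySem.Dict.insert, PySem.Dict.getD, PySem.Dict.get?]
    | x :: y :: z :: rest =>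
      rw [show pvStride3 (x :: y :: z :: rest) = x :: pvStride3 rest from by rw [pvStride3]; rfl,
          show (x :: y :: z :: rest).drop 1 = y :: z :: rest from rfl,
          show pvStride3 (y :: z :: rest) = y :: pvStride3 (rest.drop 1) from by rw [pvStride3]; rfl,
          show (x :: y :: z :: rest).drop 2 = z :: rest from rfl,
          show pvStride3 (z :: rest) = z :: pvStride3 (rest.drop 2) from by rw [pvStride3]]
      rw [PySem.List.enumerate_cons, PySem.List.enumerate_cons, PySem.List.enumerate_cons]
      have s30 : ∀ (a b c : List String) (g : List String → List String),
          (PySem.Dict.mk [("30 Days", a), ("60 Days", b), ("90 Days", c)]).modify "30 Days" [] g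
            = PySem.Dict.mk [("30 Days", g a), ("60 Days", b), ("90 Days", c)] := by
        intro a b c g
        simp [PySem.Dict.modify, PySem.Dict.insert, PySem.Dict.getD, PySem.Dict.get?]
      have s60 : ∀ (a b c : List String) (g : List String → List String),
          (PySem.Dict.mk [("30 Days", a), ("60 Days", b), ("90 Days", c)]).modify "60 Days" [] g
            = PySem.Dict.mk [("30 Days", a), ("60 Days", g b), ("90 Days", c)] := by
        intro a b c g
        simp [PySem.Dict.modify, PySem.Dict.insert, PySem.Dict.getD, PySem.Dict.get?]
      have s90 : ∀ (a b c : List String) (g : List String → List String),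
          (PySem.Dict.mk [("30 Days", a), ("60 Days", b), ("90 Days", c)]).modify "90 Days" [] g
            = PySem.Dict.mk [("30 Days", a), ("60 Days", b), ("90 Days", g c)] := by
        intro a b c g
        simp [PySem.Dict.modify, PySem.Dict.insert, PySem.Dict.getD, PySem.Dict.get?]
      simp only [List.foldl_cons, hm0, hm1, hm2, Int.reduceBEq, Bool.false_eq_true, if_true, if_false, s30, s60, s90]
      have hstep : (3 : Int) * (m : Int) + 1 + 1 + 1 = 3 * ((m + 1 : Nat) : Int) := by push_cast; ring
      rw [hstep, ih rest.length (by simp_all; omega) rest (m + 1)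
            (a ++ ["Learn basics of " ++ x ++ " (online tutorials)."])
            (b ++ ["Do a mini-project using " ++ y ++ "."])
            (c ++ ["Master " ++ z ++ " and apply it in a portfolio project."]) rfl]
      simp

theorem pvSlice3_lit (xs : List String) :
    ((PySem.List.slice? xs (some 0) none 3).getD [] = pvStride3 xs) ∧
    ((PySem.List.slice? xs (some 1) none 3).getD [] = pvStride3 (xs.drop 1)) ∧
    ((PySem.List.slice? xs (some 2) none 3).getD [] = pvStride3 (xs.drop 2)) :=
  ⟨by simpa using pvSlice3 xs 0, by simpa using pvSlice3 xs 1, by simpa using pvSlice3 xs 2⟩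

-- ===== VERDICT (by name: the statement is the Claim_ definition above) =====
theorem generate_learning_plan_spec : Claim_equal_generate_learning_plan := by
  intro role_title missing_skills _
  unfold Spec_generate_learning_plan generate_learning_plan generate_learning_plan_alt
  by_cases h : missing_skills = []
  · subst h
    simp [PySem.Dict.modify, PySem.Dict.insert, PySem.Dict.getD, PySem.Dict.get?]
  · simp only [if_neg h]
    have hA := pvLoopA missing_skills 0 [] [] []
    simp only [Nat.cast_zero, mul_zero] at hA
    rw [hA, (pvSlice3_lit missing_skills).1, (pvSlice3_lit missing_skills).2.1,
        (pvSlice3_lit missing_skills).2.2]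
    simp
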